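-- pv_equiv track=rewrite | github.com/dhis2/dhis2-core | dhis-2/dhis-test-performance/scripts/generate_org_units.py | calculate_tree_structure
-- ===== SOURCE A (Python) =====
-- def calculate_tree_structure(
--     target_count: int, branching_factors: list[int]
-- ) -> list[int]:
--     """
--     Calculate how many nodes at each level to reach target count.
--     Returns list of counts per level.
--     """
--     # Calculate cumulative counts
--     counts = [1]  # Root level
--     cumulative = 1
--
--     for bf in branching_factors:
--         next_count = counts[-1] * bf
--         cumulative += next_count
--         counts.append(next_count)
--
--         if cumulative >= target_count:
--             break
--
--     return counts
-- ===== SOURCE B (Python) =====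
-- def calculate_tree_structure(
--     target_count: int, branching_factors: list[int]
-- ) -> list[int]:
--     """
--     Calculate how many nodes at each level to reach target count.
--     Returns list of counts per level.
--     """
--     # Pass 1: determine how many levels below the root are needed.
--     depth = 0
--     width = 1
--     total = 1
--     for bf in branching_factors:
--         width *= bf
--         total += width
--         depth += 1
--         if total >= target_count:
--             break
--
--     # Pass 2: materialize the level widths down to that depth.
--     counts = [1]
--     for bf in branching_factors[:depth]:
--         counts.append(counts[-1] * bf)
--     return counts
-- ===== Notes on version B (the rewrite author's own statement) =====
-- stated objective: alternative
-- what changed: B splits the work into two staged passes: pass 1 computes only the needed tree depth with scalar running width/total, pass 2 rebuilds the prefix-product table over the branching factors sliced to that depth, instead of A's single interleaved loop that grows the list and the cumulative total together and breaks early.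
import Mathlib
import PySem

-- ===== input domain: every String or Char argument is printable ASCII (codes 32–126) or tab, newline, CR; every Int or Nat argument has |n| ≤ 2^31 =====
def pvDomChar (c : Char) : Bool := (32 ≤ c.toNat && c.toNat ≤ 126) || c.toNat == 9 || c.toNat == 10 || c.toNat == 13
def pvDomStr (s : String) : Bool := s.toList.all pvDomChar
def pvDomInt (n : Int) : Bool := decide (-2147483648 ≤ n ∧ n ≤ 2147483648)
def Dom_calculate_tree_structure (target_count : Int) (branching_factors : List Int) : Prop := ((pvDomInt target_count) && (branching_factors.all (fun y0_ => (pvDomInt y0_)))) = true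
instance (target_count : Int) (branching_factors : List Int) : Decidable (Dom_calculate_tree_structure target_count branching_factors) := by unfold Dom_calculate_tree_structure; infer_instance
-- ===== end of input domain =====

-- ===== PORT A =====
-- A interleaves: grow the counts list and the cumulative total together, breaking
-- as soon as the cumulative total reaches target_count.
def calcA_loop (target_count : Int) : List Int → List Int → Int → List Int
  | [], counts, _ => counts
  | bf :: rest, counts, cumulative =>
    let next_count := PySem.List.pyGetD counts (-1) 0 * bf  -- counts[-1]; counts is never empty
    let cumulative' := cumulative + next_count
    let counts' := counts ++ [next_count]
    if cumulative' ≥ target_count then counts'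
    else calcA_loop target_count rest counts' cumulative'

def calculate_tree_structure (target_count : Int) (branching_factors : List Int) : List Int :=
  calcA_loop target_count branching_factors [1] 1

-- ===== PORT B =====
-- B is staged: pass 1 finds the needed depth (no list is built, only the running
-- width and total); pass 2 materializes the level widths down to that depth.
def altDepth (target_count : Int) : List Int → Int → Int → Int → Int
  | [], depth, _, _ => depth
  | bf :: rest, depth, width, total =>
    let width' := width * bf
    let total' := total + width'
    let depth' := depth + 1
    if total' ≥ target_count then depth'
    else altDepth target_count rest depth' width' total'

def altBuild (bfs : List Int) : List Int :=
  bfs.foldl (fun counts bf => counts ++ [PySem.List.pyGetD counts (-1) 0 * bf]) [1]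

def calculate_tree_structure_alt (target_count : Int) (branching_factors : List Int) : List Int :=
  let depth := altDepth target_count branching_factors 0 1 1
  altBuild (PySem.List.slice branching_factors none (some depth))  -- branching_factors[:depth]

-- ===== PRECONDITION & SPEC =====
def Spec_calculate_tree_structure (target_count : Int) (branching_factors : List Int) (out : List Int) : Prop := out = calculate_tree_structure_alt target_count branching_factors
instance (target_count : Int) (branching_factors : List Int) (out : List Int) : Decidable (Spec_calculate_tree_structure target_count branching_factors out) := by unfold Spec_calculate_tree_structure; infer_instance

-- ===== CLAIM (what is proved, stated in full; the proofs are below) =====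
def Claim_equal_calculate_tree_structure : Prop := ∀ (target_count : Int) (branching_factors : List Int), Dom_calculate_tree_structure target_count branching_factors → Spec_calculate_tree_structure target_count branching_factors (calculate_tree_structure target_count branching_factors)

-- ===== LEMMAS AND PROOFS =====

-- Reference shape: the level widths appended after the root, given current width p
-- and cumulative total c.
def refCounts (t : Int) : Int → Int → List Int → List Int
  | _, _, [] => []
  | p, c, bf :: rest =>
    let q := p * bf
    q :: (if c + q ≥ t then [] else refCounts t q (c + q) rest)

-- Prefix products after the root, given current width p.
def prods : Int → List Int → List Int
  | _, [] => []
  | p, bf :: rest => p * bf :: prods (p * bf) rest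

theorem calcA_loop_eq (t : Int) (bfs : List Int) : ∀ (cs : List Int) (p c : Int),
    calcA_loop t bfs (cs ++ [p]) c = (cs ++ [p]) ++ refCounts t p c bfs := by
  induction bfs with
  | nil => intro cs p c; simp [calcA_loop, refCounts]
  | cons bf rest ih =>
    intro cs p c
    simp only [calcA_loop, refCounts, PySem.List.pyGetD_neg_one_append_singleton]
    by_cases h : c + p * bf ≥ t
    · simp [h]
    · simp only [h, ite_false]
      rw [ih (cs ++ [p]) (p * bf) (c + p * bf)]
      simp

theorem altBuild_foldl (bfs : List Int) : ∀ (cs : List Int) (p : Int),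
    bfs.foldl (fun counts bf => counts ++ [PySem.List.pyGetD counts (-1) 0 * bf]) (cs ++ [p])
      = (cs ++ [p]) ++ prods p bfs := by
  induction bfs with
  | nil => intro cs p; simp [prods]
  | cons bf rest ih =>
    intro cs p
    simp only [List.foldl_cons, PySem.List.pyGetD_neg_one_append_singleton, prods]
    rw [ih (cs ++ [p]) (p * bf)]
    simp

theorem altBuild_eq (bfs : List Int) : altBuild bfs = 1 :: prods 1 bfs := by
  have := altBuild_foldl bfs [] 1
  simpa [altBuild] using this

theorem altDepth_ge (t : Int) (bfs : List Int) : ∀ (dep p c : Int),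
    dep ≤ altDepth t bfs dep p c := by
  induction bfs with
  | nil => intro dep p c; simp [altDepth]
  | cons bf rest ih =>
    intro dep p c
    simp only [altDepth]
    by_cases h : c + p * bf ≥ t
    · simp [h]
    · simp only [h, ite_false]
      have := ih (dep + 1) (p * bf) (c + p * bf)
      omega

theorem altDepth_spec (t : Int) (bfs : List Int) : ∀ (dep p c : Int),
    prods p (List.take (altDepth t bfs dep p c - dep).toNat bfs) = refCounts t p c bfs := by
  induction bfs with
  | nil => intro dep p c; simp [altDepth, refCounts, prods]
  | cons bf rest ih =>
    intro dep p c
    simp only [altDepth, refCounts]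
    by_cases h : c + p * bf ≥ t
    · simp only [h, ite_true]
      have : (dep + 1 - dep).toNat = 1 := by omega
      rw [this]
      simp [prods]
    · simp only [h, ite_false]
      have hge : dep + 1 ≤ altDepth t rest (dep + 1) (p * bf) (c + p * bf) :=
        altDepth_ge t rest (dep + 1) (p * bf) (c + p * bf)
      have hsucc : (altDepth t rest (dep + 1) (p * bf) (c + p * bf) - dep).toNat
          = (altDepth t rest (dep + 1) (p * bf) (c + p * bf) - (dep + 1)).toNat + 1 := by
        omega
      rw [hsucc, List.take_succ_cons]
      simp only [prods]
      rw [ih (dep + 1) (p * bf) (c + p * bf)]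

-- ===== VERDICT (by name: the statement is the Claim_ definition above) =====
theorem calculate_tree_structure_spec : Claim_equal_calculate_tree_structure := by
  intro t bfs _
  have hA := calcA_loop_eq t bfs [] 1 1
  simp only [List.nil_append] at hA
  have hd0 : (0 : Int) ≤ altDepth t bfs 0 1 1 := altDepth_ge t bfs 0 1 1
  have hspec := altDepth_spec t bfs 0 1 1
  simp only [Int.sub_zero] at hspec
  simp only [Spec_calculate_tree_structure, calculate_tree_structure,
    calculate_tree_structure_alt, PySem.List.slice_to bfs hd0, altBuild_eq]
  rw [hA, hspec]
  simp
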